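-- pv_equiv track=rewrite | github.com/joshanashakya/dissertation | workspace/dataset/java-python/GeeksForGeeks/3041/A/2.py | segments
-- ===== SOURCE A (Python) =====
-- def segments(n, p, m):
--
--     c = dict()
--
--     c[0] = 1
--
--     has = False
--
--     Sum = 0
--
--     ans = 0
--
--     for r in range(n):
--
--         # If element is less than m
--         if (p[r] < m):
--             Sum -= 1
--
--         # If element greater than m
--         elif (p[r] > m):
--             Sum += 1
--
--         # If m is found
--         if (p[r] == m):
--             has = True
--
--         # Count the answer
--         if (has):
--             if(Sum in c.keys()):
--                 ans += c[Sum]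
--             if Sum-1 in c.keys():
--                 ans += c[Sum - 1]
--
--         # Increment Sum
--         else:
--             c[Sum] = c.get(Sum, 0) + 1
--
--     return ans
-- ===== SOURCE B (Python) =====
-- def segments(n, p, m):
--     # Direct window enumeration: find the first occurrence of m, then for each
--     # left end l at/before it walk the right end across, counting windows whose
--     # balance of (>m) minus (<m) elements is 0 or 1. No dict, no prefix table.
--     idx = 0
--     while idx < n and p[idx] != m:
--         idx += 1
--     ans = 0
--     for l in range(idx + 1):
--         bal = 0
--         for r in range(l, n):
--             if p[r] > m:
--                 bal += 1
--             elif p[r] < m: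
--                 bal -= 1
--             if r >= idx and (bal == 0 or bal == 1):
--                 ans += 1
--     return ans
-- ===== Notes on version B (the rewrite author's own statement) =====
-- stated objective: alternative
-- what changed: A's single pass maintaining a dict of prefix-balance counts and a 'has' flag is replaced by direct brute-force window enumeration: a while-loop locates the first occurrence of m, then two nested for-loops walk every window straddling it, accumulating its balance element by element with no dict or prefix table at all.
import Mathlib
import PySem

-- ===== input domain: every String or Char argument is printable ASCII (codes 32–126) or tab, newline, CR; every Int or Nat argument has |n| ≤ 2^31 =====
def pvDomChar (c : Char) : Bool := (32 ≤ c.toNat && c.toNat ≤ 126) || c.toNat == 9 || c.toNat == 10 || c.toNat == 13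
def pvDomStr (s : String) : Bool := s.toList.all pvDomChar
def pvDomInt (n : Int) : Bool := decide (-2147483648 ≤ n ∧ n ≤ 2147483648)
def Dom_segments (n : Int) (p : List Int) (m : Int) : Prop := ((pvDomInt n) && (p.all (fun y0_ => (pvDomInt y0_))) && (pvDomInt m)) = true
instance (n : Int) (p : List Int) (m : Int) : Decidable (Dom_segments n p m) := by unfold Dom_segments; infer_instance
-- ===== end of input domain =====

-- B replaces A's dict-of-prefix-balances single pass by brute-force window
-- enumeration (a while-loop locating the first m, then nested loops over all
-- windows straddling it); objective: alternative (B is quadratic, not faster).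

-- ===== PORT A =====
-- loop body of A; state (c, has, Sum, ans); p[r] via pyGetD (in range under Pre_segments)
def segAStep (p : List Int) (m : Int)
    (st : PySem.Dict Int Int × Bool × Int × Int) (r : Int) :
    PySem.Dict Int Int × Bool × Int × Int :=
  let x := PySem.List.pyGetD p r 0
  let Sum := if x < m then st.2.2.1 - 1 else if x > m then st.2.2.1 + 1 else st.2.2.1
  let has := if x = m then true else st.2.1
  if has then
    (st.1, has, Sum,
     st.2.2.2 + (if st.1.contains Sum then st.1.getD Sum 0 else 0)
              + (if st.1.contains (Sum - 1) then st.1.getD (Sum - 1) 0 else 0))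
  else
    (st.1.insert Sum (st.1.getD Sum 0 + 1), has, Sum, st.2.2.2)

def segments (n : Int) (p : List Int) (m : Int) : Int :=
  ((PySem.List.pyRange 0 n 1).foldl (segAStep p m)
    ((PySem.Dict.empty.insert 0 1 : PySem.Dict Int Int), false, 0, 0)).2.2.2

-- ===== PORT B =====
-- the while-loop of B: first index idx ≥ start with idx < n and p[idx] == m (else stops at n)
def segBFindIdx (n : Int) (p : List Int) (m : Int) (idx : Int) : Int :=
  if h : idx < n ∧ PySem.List.pyGetD p idx 0 ≠ m then segBFindIdx n p m (idx + 1) else idx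
termination_by (n - idx).toNat
decreasing_by omega

-- inner loop body of B; state (bal, ans)
def segBStep (p : List Int) (m : Int) (idx : Int) (st : Int × Int) (r : Int) : Int × Int :=
  let x := PySem.List.pyGetD p r 0
  let bal := if x > m then st.1 + 1 else if x < m then st.1 - 1 else st.1
  (bal, if idx ≤ r ∧ (bal = 0 ∨ bal = 1) then st.2 + 1 else st.2)

def segments_alt (n : Int) (p : List Int) (m : Int) : Int :=
  let idx := segBFindIdx n p m 0
  (PySem.List.pyRange 0 (idx + 1) 1).foldl
    (fun ans l => ((PySem.List.pyRange l n 1).foldl (segBStep p m idx) (0, ans)).2) 0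

-- ===== PRECONDITION & SPEC =====
-- Pre_ excludes n > len(p), where Python A (and B) raise IndexError on p[r].
def Pre_segments (n : Int) (p : List Int) (m : Int) : Prop := n ≤ (p.length : Int)
instance (n : Int) (p : List Int) (m : Int) : Decidable (Pre_segments n p m) := by unfold Pre_segments; infer_instance
def pvWitness_segments : Int × List Int × Int := (3, [1, 2, 3], 2)

def Spec_segments (n : Int) (p : List Int) (m : Int) (out : Int) : Prop := out = segments_alt n p m
instance (n : Int) (p : List Int) (m : Int) (out : Int) : Decidable (Spec_segments n p m out) := by unfold Spec_segments; infer_instance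

-- ===== CLAIM (what is proved, stated in full; the proofs are below) =====
def Claim_equal_segments : Prop := ∀ (n : Int) (p : List Int) (m : Int), Dom_segments n p m → Pre_segments n p m → Spec_segments n p m (segments n p m)

-- ===== LEMMAS AND PROOFS =====

-- balance contribution of one element ((x > m) minus (x < m))
def segDlt (m x : Int) : Int := if x > m then 1 else if x < m then -1 else 0

-- balance of the prefix of the first i elements
def segPref (p : List Int) (m : Int) (i : Int) : Int := ((p.take i.toNat).map (segDlt m)).sum

lemma segPref_succ (p : List Int) (m i : Int) (h0 : 0 ≤ i) (h : i < (p.length : Int)) :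
    segPref p m (i + 1) = segPref p m i + segDlt m (PySem.List.pyGetD p i 0) := by
  unfold segPref
  have hlt : i.toNat < p.length := by omega
  have h1 : (i+1).toNat = i.toNat + 1 := by omega
  have hlt' : i.toNat < (List.map (segDlt m) p).length := by simpa using hlt
  have hg : PySem.List.pyGetD p i 0 = p[i.toNat] := PySem.List.pyGetD_eq_getElem p 0 h0 h
  rw [hg, h1, List.map_take, List.map_take, List.take_add_one, List.getElem?_eq_getElem hlt']
  simp

lemma seg_contains_getD (c : PySem.Dict Int Int) (k : Int) :
    (if c.contains k then c.getD k 0 else 0) = c.getD k 0 := by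
  cases h : c.contains k with
  | true => simp
  | false => simp [PySem.Dict.getD_of_not_contains c 0 h]

lemma seg_sum_update (s m x : Int) :
    (if x < m then s - 1 else if x > m then s + 1 else s) = s + segDlt m x := by
  unfold segDlt; split_ifs <;> omega

lemma segAStep_true (p : List Int) (m : Int) (c : PySem.Dict Int Int) (s ans i : Int) :
    segAStep p m (c, true, s, ans) i =
      (c, true, s + segDlt m (PySem.List.pyGetD p i 0),
       ans + c.getD (s + segDlt m (PySem.List.pyGetD p i 0)) 0
           + c.getD (s + segDlt m (PySem.List.pyGetD p i 0) - 1) 0) := by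
  unfold segAStep
  simp only [ite_self, if_true, seg_sum_update, seg_contains_getD]

lemma segAStep_false (p : List Int) (m : Int) (c : PySem.Dict Int Int) (s ans i : Int)
    (h : PySem.List.pyGetD p i 0 ≠ m) :
    segAStep p m (c, false, s, ans) i =
      (c.insert (s + segDlt m (PySem.List.pyGetD p i 0))
         (c.getD (s + segDlt m (PySem.List.pyGetD p i 0)) 0 + 1),
       false, s + segDlt m (PySem.List.pyGetD p i 0), ans) := by
  unfold segAStep
  simp only [if_neg h, seg_sum_update, Bool.false_eq_true, if_false]

lemma segAStep_pivot (p : List Int) (m : Int) (c : PySem.Dict Int Int) (s ans i : Int)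
    (h : PySem.List.pyGetD p i 0 = m) :
    segAStep p m (c, false, s, ans) i =
      (c, true, s, ans + c.getD s 0 + c.getD (s - 1) 0) := by
  unfold segAStep
  have hx : ¬ (PySem.List.pyGetD p i 0 < m) := by omega
  have hx' : ¬ (PySem.List.pyGetD p i 0 > m) := by omega
  simp only [if_pos h, if_neg hx, if_neg hx', if_true, seg_contains_getD]

lemma segBStep_eq (p : List Int) (m idx b a r : Int) :
    segBStep p m idx (b, a) r =
      (b + segDlt m (PySem.List.pyGetD p r 0),
       if idx ≤ r ∧ (b + segDlt m (PySem.List.pyGetD p r 0) = 0 ∨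
                     b + segDlt m (PySem.List.pyGetD p r 0) = 1)
       then a + 1 else a) := by
  unfold segBStep segDlt
  split_ifs <;> simp_all <;> omega

-- characterization of B's while-loop: no m in [i, n)
lemma segBFindIdx_none (n : Int) (p : List Int) (m : Int) :
    ∀ (i : Int), i ≤ n → (∀ j : Int, i ≤ j → j < n → PySem.List.pyGetD p j 0 ≠ m) →
      segBFindIdx n p m i = n := by
  intro i hi hall
  induction hmeas : (n - i).toNat using Nat.strong_induction_on generalizing i with
  | _ k ih =>
    rw [segBFindIdx]
    by_cases hc : i < n ∧ PySem.List.pyGetD p i 0 ≠ m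
    · rw [dif_pos hc]
      exact ih (n - (i+1)).toNat (by omega) (i+1) (by omega)
        (fun j h1 h2 => hall j (by omega) h2) rfl
    · rw [dif_neg hc]
      by_cases hin : i < n
      · exact absurd ⟨hin, hall i le_rfl hin⟩ hc
      · omega

-- characterization of B's while-loop: j is the first m at or after i
lemma segBFindIdx_found (n : Int) (p : List Int) (m : Int) (j : Int)
    (hjn : j < n) (hm : PySem.List.pyGetD p j 0 = m) :
    ∀ (i : Int), i ≤ j → (∀ t : Int, i ≤ t → t < j → PySem.List.pyGetD p t 0 ≠ m) →
      segBFindIdx n p m i = j := by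
  intro i hi hall
  induction hmeas : (j - i).toNat using Nat.strong_induction_on generalizing i with
  | _ k ih =>
    rw [segBFindIdx]
    by_cases hij : i = j
    · subst hij
      rw [dif_neg (by simp [hm])]
    · have hlt : i < j := by omega
      rw [dif_pos ⟨by omega, hall i le_rfl hlt⟩]
      exact ih (j - (i+1)).toNat (by omega) (i+1) (by omega)
        (fun t h1 h2 => hall t (by omega) h2) rfl

-- phase 1 of A: while has is false the loop only builds the dict of prefix-balance counts
lemma A_phase1 (p : List Int) (m : Int) :
    ∀ (k : Nat) (a : Int), (k : Int) ≤ (p.length : Int) →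
      (∀ i : Nat, i < k → PySem.List.pyGetD p (i : Int) 0 ≠ m) →
      ∃ c : PySem.Dict Int Int,
        (PySem.List.pyRange 0 (k : Int) 1).foldl (segAStep p m)
          ((PySem.Dict.empty.insert 0 1 : PySem.Dict Int Int), false, 0, a)
          = (c, false, segPref p m (k : Int), a) ∧
        ∀ s : Int, c.getD s 0
          = ∑ l ∈ Finset.range (k + 1), if segPref p m (l : Int) = s then (1 : Int) else 0 := by
  intro k
  induction k with
  | zero =>
    intro a _ _
    refine ⟨(PySem.Dict.empty.insert 0 1 : PySem.Dict Int Int), ?_, ?_⟩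
    · simp [PySem.List.pyRange_one_eq_nil, segPref]
    · intro s
      rw [Finset.sum_range_one, PySem.Dict.getD_insert]
      have h0 : segPref p m ((0:Nat):Int) = 0 := by simp [segPref]
      rw [h0]
      by_cases hs : s = 0
      · rw [if_pos hs, if_pos hs.symm]
      · rw [if_neg hs, if_neg (fun h => hs h.symm)]
        exact PySem.Dict.getD_empty s 0
  | succ k ih =>
    intro a hlen hne
    obtain ⟨c, hc, hcnt⟩ := ih a (by push_cast at hlen ⊢; omega) (fun i hi => hne i (by omega))
    have hsplit : PySem.List.pyRange 0 ((k+1 : Nat) : Int) 1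
        = PySem.List.pyRange 0 (k : Int) 1 ++ [(k : Int)] := by
      push_cast
      exact PySem.List.pyRange_one_succ_right (Int.natCast_nonneg k)
    rw [hsplit, List.foldl_append, hc]
    simp only [List.foldl_cons, List.foldl_nil]
    rw [segAStep_false p m c _ a (k : Int) (hne k (by omega))]
    have hps : segPref p m ((k : Int) + 1)
        = segPref p m (k : Int) + segDlt m (PySem.List.pyGetD p (k : Int) 0) := by
      exact segPref_succ p m _ (Int.natCast_nonneg k) (by push_cast at hlen ⊢; omega)
    have hcast : ((k+1:Nat):Int) = (k:Int)+1 := by push_cast; ring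
    rw [← hps]
    refine ⟨c.insert (segPref p m ((k:Int)+1)) (c.getD (segPref p m ((k:Int)+1)) 0 + 1),
      by rw [hcast], ?_⟩
    intro s
    rw [PySem.Dict.getD_insert, Finset.sum_range_succ, hcast, ← hcnt s]
    by_cases hs : s = segPref p m ((k:Int)+1)
    · rw [if_pos hs, if_pos hs.symm, hs]
    · rw [if_neg hs, if_neg (fun h => hs h.symm), add_zero]

-- phase 2 of A: with has set the dict is frozen and each step adds two lookups
lemma A_phase2 (p : List Int) (m : Int) (c : PySem.Dict Int Int) :
    ∀ (k : Nat) (s a : Int), 0 ≤ s → s + (k : Int) ≤ (p.length : Int) →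
      (PySem.List.pyRange s (s + (k : Int)) 1).foldl (segAStep p m) (c, true, segPref p m s, a)
        = (c, true, segPref p m (s + (k : Int)),
           a + ∑ j ∈ Finset.range k,
             (c.getD (segPref p m (s + (j : Int) + 1)) 0
              + c.getD (segPref p m (s + (j : Int) + 1) - 1) 0)) := by
  intro k
  induction k with
  | zero => intro s a h0 hlen; simp [PySem.List.pyRange_one_eq_nil]
  | succ k ih =>
    intro s a h0 hlen
    have hcast : ((k+1:Nat):Int) = (k:Int)+1 := by push_cast; ring
    have hsplit : PySem.List.pyRange s (s + ((k+1:Nat):Int)) 1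
        = PySem.List.pyRange s (s + (k:Int)) 1 ++ [s + (k:Int)] := by
      rw [hcast, ← add_assoc]
      exact PySem.List.pyRange_one_succ_right (by omega)
    rw [hsplit, List.foldl_append, ih s a h0 (by push_cast at hlen ⊢; omega)]
    simp only [List.foldl_cons, List.foldl_nil]
    rw [segAStep_true]
    have hps : segPref p m (s + (k:Int) + 1)
        = segPref p m (s + (k:Int)) + segDlt m (PySem.List.pyGetD p (s + (k:Int)) 0) :=
      segPref_succ p m _ (by omega) (by push_cast at hlen ⊢; omega)
    rw [← hps, Finset.sum_range_succ, hcast, ← add_assoc s]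
    refine congrArg _ (congrArg _ (congrArg _ ?_))
    ring

-- inner loop of B accumulates the window balance and counts windows
lemma B_inner (p : List Int) (m idx : Int) :
    ∀ (k : Nat) (l b a : Int), 0 ≤ l → l + (k : Int) ≤ (p.length : Int) →
      (PySem.List.pyRange l (l + (k : Int)) 1).foldl (segBStep p m idx) (b, a)
        = (b + (segPref p m (l + (k : Int)) - segPref p m l),
           a + ∑ j ∈ Finset.range k,
             if idx ≤ l + (j : Int) ∧
                (b + (segPref p m (l + (j : Int) + 1) - segPref p m l) = 0 ∨
                 b + (segPref p m (l + (j : Int) + 1) - segPref p m l) = 1)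
             then (1 : Int) else 0) := by
  intro k
  induction k with
  | zero => intro l b a h0 hlen; simp [PySem.List.pyRange_one_eq_nil]
  | succ k ih =>
    intro l b a h0 hlen
    have hcast : ((k+1:Nat):Int) = (k:Int)+1 := by push_cast; ring
    have hsplit : PySem.List.pyRange l (l + ((k+1:Nat):Int)) 1
        = PySem.List.pyRange l (l + (k:Int)) 1 ++ [l + (k:Int)] := by
      rw [hcast, ← add_assoc]
      exact PySem.List.pyRange_one_succ_right (by omega)
    rw [hsplit, List.foldl_append, ih l b a h0 (by push_cast at hlen ⊢; omega)]
    simp only [List.foldl_cons, List.foldl_nil]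
    rw [segBStep_eq]
    have hps : segPref p m (l + (k:Int) + 1)
        = segPref p m (l + (k:Int)) + segDlt m (PySem.List.pyGetD p (l + (k:Int)) 0) :=
      segPref_succ p m _ (by omega) (by push_cast at hlen ⊢; omega)
    rw [Finset.sum_range_succ, hcast, ← add_assoc l]
    have harg : b + (segPref p m (l + (k:Int)) - segPref p m l)
        + segDlt m (PySem.List.pyGetD p (l + (k:Int)) 0)
        = b + (segPref p m (l + (k:Int) + 1) - segPref p m l) := by omega
    rw [harg]
    split_ifs with h
    · refine Prod.ext rfl ?_; ring
    · refine Prod.ext rfl ?_; ring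

-- B's outer loop is a plain sum when each iteration adds a value independent of the accumulator
lemma seg_foldl_sum (F : Int → Int → Int) (S : Int → Int) :
    ∀ (K : Nat) (a : Int), (∀ x : Int, ∀ l : Nat, l < K → F x (l : Int) = x + S (l : Int)) →
      (PySem.List.pyRange 0 (K : Int) 1).foldl F a = a + ∑ l ∈ Finset.range K, S (l : Int) := by
  intro K
  induction K with
  | zero => intro a _; simp [PySem.List.pyRange_one_eq_nil]
  | succ K ih =>
    intro a hF
    have hsplit : PySem.List.pyRange 0 ((K+1 : Nat) : Int) 1
        = PySem.List.pyRange 0 (K : Int) 1 ++ [(K : Int)] := by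
      push_cast
      exact PySem.List.pyRange_one_succ_right (Int.natCast_nonneg K)
    rw [hsplit, List.foldl_append, ih a (fun x l hl => hF x l (by omega))]
    simp only [List.foldl_cons, List.foldl_nil]
    rw [hF _ K (by omega), Finset.sum_range_succ]
    ring

-- ===== VERDICT (by name: the statement is the Claim_ definition above) =====
theorem segments_spec : Claim_equal_segments := by
  unfold Claim_equal_segments
  intro n p m _ hpre
  unfold Pre_segments at hpre
  simp only [Spec_segments, segments, segments_alt]
  by_cases hn : n ≤ 0
  · -- empty range: both return 0
    have hidx : segBFindIdx n p m 0 = 0 := by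
      rw [segBFindIdx, dif_neg (by omega)]
    rw [hidx, PySem.List.pyRange_one_eq_nil hn]
    have h01 : PySem.List.pyRange 0 (0 + 1) 1 = [0] := by decide
    rw [h01]
    simp [PySem.List.pyRange_one_eq_nil hn]
  · replace hn : 0 < n := by omega
    set N := n.toNat with hN
    have hnN : (N : Int) = n := by omega
    have hlen : (N : Int) ≤ (p.length : Int) := by omega
    by_cases hex : ∃ jn : Nat, jn < N ∧ PySem.List.pyGetD p (jn : Int) 0 = m
    · -- the first occurrence of m is at index j0: split A's loop there,
      -- and express both sides as the same double sum over (left end, right end)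
      have hj0N : Nat.find hex < N := (Nat.find_spec hex).1
      have hj0m : PySem.List.pyGetD p ((Nat.find hex : Nat) : Int) 0 = m := (Nat.find_spec hex).2
      set j0 := Nat.find hex with hj0def
      have hminN : ∀ t : Nat, t < j0 → PySem.List.pyGetD p (t : Int) 0 ≠ m := by
        intro t ht hm'
        exact Nat.find_min hex ht ⟨by omega, hm'⟩
      have hminI : ∀ t : Int, 0 ≤ t → t < (j0 : Int) → PySem.List.pyGetD p t 0 ≠ m := by
        intro t h1 h2
        have := hminN t.toNat (by omega)
        rwa [Int.toNat_of_nonneg h1] at this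
      have hidx : segBFindIdx n p m 0 = (j0 : Int) :=
        segBFindIdx_found n p m (j0 : Int) (by omega) hj0m 0 (by omega) hminI
      rw [hidx]
      obtain ⟨c, hc, hcnt⟩ := A_phase1 p m j0 0 (by omega) hminN
      have hsplitA : PySem.List.pyRange 0 n 1
          = PySem.List.pyRange 0 (j0 : Int) 1
            ++ ((j0 : Int) :: PySem.List.pyRange ((j0 : Int) + 1) n 1) := by
        rw [← PySem.List.pyRange_one_cons (show (j0:Int) < n by omega)]
        exact PySem.List.pyRange_one_append 0 (j0:Int) n (Int.natCast_nonneg j0) (by omega)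
      rw [hsplitA, List.foldl_append, hc]
      simp only [List.foldl_cons]
      rw [segAStep_pivot p m c _ 0 _ hj0m]
      have hps0 : segPref p m ((j0 : Int) + 1) = segPref p m (j0 : Int) := by
        rw [segPref_succ p m _ (Int.natCast_nonneg j0) (by omega), hj0m]
        simp [segDlt]
      rw [← hps0]
      set k2 := N - (j0 + 1) with hk2def
      have hk2 : (j0 : Int) + 1 + (k2 : Int) = n := by omega
      rw [show PySem.List.pyRange ((j0:Int)+1) n 1
            = PySem.List.pyRange ((j0:Int)+1) ((j0:Int)+1+(k2:Int)) 1 by rw [hk2]]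
      rw [A_phase2 p m c k2 ((j0:Int)+1) _ (by omega) (by omega)]
      -- A's answer as one sum over the right ends j0, j0+1, …, n-1
      have hA : (0 + c.getD (segPref p m ((j0:Int)+1)) 0
                   + c.getD (segPref p m ((j0:Int)+1) - 1) 0)
              + (∑ j ∈ Finset.range k2,
                  (c.getD (segPref p m ((j0:Int)+1+(j:Int)+1)) 0
                   + c.getD (segPref p m ((j0:Int)+1+(j:Int)+1) - 1) 0))
          = ∑ i ∈ Finset.range (k2+1),
              (c.getD (segPref p m (((j0+i : Nat):Int)+1)) 0
               + c.getD (segPref p m (((j0+i : Nat):Int)+1) - 1) 0) := by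
        rw [Finset.sum_range_succ']
        have h0 : ((j0+0 : Nat):Int) = (j0:Int) := by push_cast; ring
        rw [h0]
        have hterm : ∀ j : Nat,
            c.getD (segPref p m (((j0+(j+1) : Nat):Int)+1)) 0
              + c.getD (segPref p m (((j0+(j+1) : Nat):Int)+1) - 1) 0
            = c.getD (segPref p m ((j0:Int)+1+(j:Int)+1)) 0
              + c.getD (segPref p m ((j0:Int)+1+(j:Int)+1) - 1) 0 := by
          intro j
          have : ((j0+(j+1) : Nat):Int)+1 = (j0:Int)+1+(j:Int)+1 := by push_cast; ring
          rw [this]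
        rw [Finset.sum_congr rfl (fun j _ => hterm j)]
        ring
      rw [hA]
      -- B's answer: outer loop = sum over left ends of a sum over right ends
      have hcastJ : ((j0+1 : Nat):Int) = (j0:Int)+1 := by push_cast; ring
      rw [← hcastJ]
      rw [seg_foldl_sum _
        (fun l => ∑ i ∈ Finset.range (k2+1),
          (if segPref p m (((j0+i : Nat):Int)+1) - segPref p m l = 0 ∨
              segPref p m (((j0+i : Nat):Int)+1) - segPref p m l = 1
           then (1:Int) else 0)) (j0+1) 0 ?hF]
      case hF =>
        intro x l hl
        have hk : (l : Int) + ((N - l : Nat) : Int) = n := by omega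
        rw [show PySem.List.pyRange (l : Int) n 1
              = PySem.List.pyRange (l : Int) ((l : Int) + ((N - l : Nat) : Int)) 1 by rw [hk]]
        rw [B_inner p m (j0:Int) (N - l) (l : Int) 0 x (Int.natCast_nonneg l) (by omega)]
        dsimp only
        refine congrArg _ ?_
        have hNl : N - l = (j0 - l) + (k2 + 1) := by omega
        rw [hNl, Finset.sum_range_add]
        have hz : ∑ j ∈ Finset.range (j0 - l),
            (if (j0:Int) ≤ (l : Int) + (j : Int) ∧
                (0 + (segPref p m ((l:Int)+(j:Int)+1) - segPref p m (l:Int)) = 0 ∨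
                 0 + (segPref p m ((l:Int)+(j:Int)+1) - segPref p m (l:Int)) = 1)
             then (1:Int) else 0) = 0 := by
          apply Finset.sum_eq_zero
          intro j hj
          rw [Finset.mem_range] at hj
          rw [if_neg]
          rintro ⟨h1, -⟩
          omega
        rw [hz, zero_add]
        apply Finset.sum_congr rfl
        intro i hi
        rw [Finset.mem_range] at hi
        have harg : (l:Int) + (((j0-l)+i : Nat):Int) + 1 = ((j0+i : Nat):Int) + 1 := by
          push_cast; omega
        rw [harg]
        have hcond : ((j0:Int) ≤ (l : Int) + (((j0-l)+i : Nat):Int) ∧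
            (0 + (segPref p m (((j0+i : Nat):Int)+1) - segPref p m (l:Int)) = 0 ∨
             0 + (segPref p m (((j0+i : Nat):Int)+1) - segPref p m (l:Int)) = 1))
          ↔ (segPref p m (((j0+i : Nat):Int)+1) - segPref p m (l:Int) = 0 ∨
             segPref p m (((j0+i : Nat):Int)+1) - segPref p m (l:Int) = 1) := by
          constructor
          · rintro ⟨-, h⟩; omega
          · intro h; refine ⟨by push_cast; omega, by omega⟩
        rw [if_congr hcond rfl rfl]
      -- swap the two sums and identify each inner sum with A's two dict lookups
      rw [zero_add, Finset.sum_comm]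
      dsimp only
      apply Finset.sum_congr rfl
      intro i _
      rw [hcnt (segPref p m (((j0+i : Nat):Int)+1)),
          hcnt (segPref p m (((j0+i : Nat):Int)+1) - 1), ← Finset.sum_add_distrib]
      apply Finset.sum_congr rfl
      intro l _
      split_ifs <;> omega
    · -- m does not occur in p[0:n]: A keeps has false, B's windows never qualify
      have hall : ∀ i : Nat, i < N → PySem.List.pyGetD p (i : Int) 0 ≠ m :=
        fun i hi hm' => hex ⟨i, hi, hm'⟩
      have hallI : ∀ j : Int, 0 ≤ j → j < n → PySem.List.pyGetD p j 0 ≠ m := by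
        intro j h1 h2
        have := hall j.toNat (by omega)
        rwa [Int.toNat_of_nonneg h1] at this
      have hidx : segBFindIdx n p m 0 = n := segBFindIdx_none n p m 0 (by omega) hallI
      rw [hidx]
      obtain ⟨c, hc, -⟩ := A_phase1 p m N 0 hlen hall
      rw [← hnN, hc]
      have hB : (PySem.List.pyRange 0 ((N : Int) + 1) 1).foldl
          (fun ans l => ((PySem.List.pyRange l (N : Int) 1).foldl
            (segBStep p m (N : Int)) (0, ans)).2) 0
          = 0 + ∑ l ∈ Finset.range (N + 1), (0 : Int) := by
        have hcast : ((N + 1 : Nat) : Int) = (N : Int) + 1 := by push_cast; ring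
        rw [← hcast]
        refine seg_foldl_sum _ (fun _ => (0:Int)) (N+1) 0 ?_
        intro x l hl
        have hk : (l : Int) + ((N - l : Nat) : Int) = (N : Int) := by omega
        rw [show PySem.List.pyRange (l : Int) (N : Int) 1
              = PySem.List.pyRange (l : Int) ((l : Int) + ((N - l : Nat) : Int)) 1 by rw [hk]]
        rw [B_inner p m (N : Int) (N - l) (l : Int) 0 x (Int.natCast_nonneg l) (by omega)]
        have hz : ∑ j ∈ Finset.range (N - l),
            (if (N : Int) ≤ (l : Int) + (j : Int) ∧
                (0 + (segPref p m ((l : Int) + (j : Int) + 1) - segPref p m (l : Int)) = 0 ∨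
                 0 + (segPref p m ((l : Int) + (j : Int) + 1) - segPref p m (l : Int)) = 1)
             then (1 : Int) else 0) = 0 := by
          apply Finset.sum_eq_zero
          intro j hj
          rw [Finset.mem_range] at hj
          rw [if_neg]
          rintro ⟨h1, -⟩
          omega
        rw [hz, add_zero]
      rw [hB]
      simp
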